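-- pv_equiv track=rewrite | github.com/Carleslc/Puzzles | KTANE/seven-deadly-sins.py | solve
-- ===== SOURCE A (Python) =====
-- GRAPH = {
--   '1': [2, 3, 5],
--   '2': [3, 4, 6],
--   '3': [4, 5, 7],
--   '4': [5, 6, 1],
--   '5': [6, 7, 2],
--   '6': [7, 1, 3],
--   '7': [1, 2, 4]
-- }
--
-- def is_next(a, b):
--   return int(b) in GRAPH[str(a)]
--
-- def get_adjacents(buttons, button):
--   N = len(buttons)
--   pos = buttons.index(button)
--   return set([buttons[(pos + 1) % N], buttons[(pos - 1) % N]])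
--
-- def get_available_adjacents(buttons, pressed):
--   adjacents = set()
--   for button in pressed:
--     adjacents.update(get_adjacents(buttons, button))
--   return [adjacent for adjacent in adjacents if adjacent not in pressed]
--
-- def solve(buttons):
--   if len(set(buttons)) != len(buttons):
--     return []
--   def get_order(pressed):
--     adjacents = get_available_adjacents(buttons, pressed)
--     candidates = adjacents if pressed else buttons
--     for candidate in candidates:
--       if not pressed or is_next(pressed[-1], candidate):
--         order = get_order(pressed + [candidate])
--         if len(order) == len(buttons):
--           return order
--     return pressed
--   return get_order([])
-- ===== SOURCE B (Python) =====
-- GRAPH = {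
--   '1': [2, 3, 5],
--   '2': [3, 4, 6],
--   '3': [4, 5, 7],
--   '4': [5, 6, 1],
--   '5': [6, 7, 2],
--   '6': [7, 1, 3],
--   '7': [1, 2, 4]
-- }
--
-- def solve(buttons):
--   n = len(buttons)
--   if len(set(buttons)) != n:
--     return []
--   # ring neighbours precomputed in one pass (replaces repeated buttons.index scans)
--   neigh = {}
--   for i, b in enumerate(buttons):
--     neigh[b] = (buttons[(i + 1) % n], buttons[(i - 1) % n])
--   # explicit LIFO stack instead of recursion; children pushed in reverse so they
--   # are popped in the original candidate order (same depth-first visitation)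
--   stack = [[]]
--   while stack:
--     pressed = stack.pop()
--     if pressed:
--       adj = set()
--       for b in pressed:
--         adj.update(neigh[b])
--       cands = [c for c in sorted(adj)
--                if c not in pressed and c in GRAPH.get(str(pressed[-1]), [])]
--     else:
--       cands = buttons
--     children = []
--     for c in cands:
--       nxt = pressed + [c]
--       if len(nxt) == n:
--         return nxt
--       children.append(nxt)
--     stack.extend(reversed(children))
--   return []
-- ===== Notes on version B (the rewrite author's own statement) =====
-- stated objective: alternative
-- what changed: The recursive backtracking get_order is replaced by an explicit LIFO stack of partial paths (children pushed in reverse to keep the first-found order), and the repeated buttons.index scans are replaced by a ring-neighbour dict built in one enumerate pass.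
import Mathlib
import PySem

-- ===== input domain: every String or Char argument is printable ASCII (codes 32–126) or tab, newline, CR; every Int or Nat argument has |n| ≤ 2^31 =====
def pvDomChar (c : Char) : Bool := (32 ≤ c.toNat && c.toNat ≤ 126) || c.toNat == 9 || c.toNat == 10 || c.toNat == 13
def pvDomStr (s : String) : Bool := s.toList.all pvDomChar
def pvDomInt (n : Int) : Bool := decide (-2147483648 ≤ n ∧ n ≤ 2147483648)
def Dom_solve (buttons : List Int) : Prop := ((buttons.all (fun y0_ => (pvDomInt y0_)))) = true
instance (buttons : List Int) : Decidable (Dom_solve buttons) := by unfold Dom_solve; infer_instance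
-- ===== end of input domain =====

-- B replaces the recursive backtracking by an explicit LIFO stack of partial paths and
-- precomputes the ring neighbours in one pass (alternative decomposition, same DFS order).


-- ===== PORT A =====

-- GRAPH (module constant, shared by both Pythons)
def GRAPH : PySem.Dict String (List Int) :=
  PySem.Dict.ofList [("1", [2, 3, 5]), ("2", [3, 4, 6]), ("3", [4, 5, 7]), ("4", [5, 6, 1]),
                     ("5", [6, 7, 2]), ("6", [7, 1, 3]), ("7", [1, 2, 4])]

-- is_next(a, b); none = KeyError from GRAPH[str(a)] (excluded by Pre_solve); int(b) = b on ints
def isNextA (a b : Int) : Option Bool :=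
  (PySem.Dict.get? GRAPH (PySem.Int.toStr a)).map (fun l => l.contains b)

-- get_adjacents(buttons, button); none = ValueError from .index (never reached: button ∈ buttons)
def getAdjacentsA (buttons : List Int) (button : Int) : Option (PySem.Set Int) :=
  match PySem.List.index? buttons button with
  | none => none
  | some pos =>
    match PySem.List.pyGet? buttons (PySem.Int.mod ((pos : Int) + 1) (buttons.length : Int)),
          PySem.List.pyGet? buttons (PySem.Int.mod ((pos : Int) - 1) (buttons.length : Int)) with
    | some x, some y => some (PySem.Set.ofList [x, y])
    | _, _ => none

-- get_available_adjacents(buttons, pressed).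
-- CPython iterates a set of ints lying in 0..7 in ascending value order (hash = identity,
-- table ≥ 8 slots); Pre_solve puts all elements in 1..7 wherever a set W multiple elements is
-- iterated, so the set iteration is ported as ascending (sorted) order — exact on Pre_solve.
def availAdjA (buttons : List Int) (pressed : List Int) : Option (List Int) :=
  match pressed.foldl (fun acc button =>
      match acc, getAdjacentsA buttons button with
      | some s, some t => some (PySem.Set.update s t)
      | _, _ => none) (some (PySem.Set.empty : PySem.Set Int)) with
  | none => none
  | some adjacents =>
    some ((PySem.List.sorted adjacents (fun x => x) false).filter (fun a => !pressed.contains a))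

-- the 'for candidate in candidates' loop of get_order (goNext = recursive call)
def goALoop (buttons : List Int) (goNext : List Int → Option (List Int)) (pressed : List Int) :
    List Int → Option (List Int)
  | [] => some pressed
  | c :: cs =>
    match (if pressed.isEmpty then some true
           else match PySem.List.pyGet? pressed (-1) with
                | none => none
                | some last => isNextA last c) with
    | none => none
    | some true =>
      match goNext (pressed ++ [c]) with
      | none => none
      | some order =>
        if order.length = buttons.length then some order else goALoop buttons goNext pressed cs
    | some false => goALoop buttons goNext pressed cs

-- get_order(pressed); fuel = recursion depth guard (buttons.length + 1 suffices, proved below)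
def goA (buttons : List Int) : Nat → List Int → Option (List Int)
  | 0, pressed => some pressed
  | f + 1, pressed =>
    match availAdjA buttons pressed with
    | none => none
    | some adjacents =>
      goALoop buttons (fun q => goA buttons f q) pressed
        (if pressed.isEmpty then buttons else adjacents)

def solve (buttons : List Int) : List Int :=
  if PySem.Set.len (PySem.Set.ofList buttons) ≠ PySem.List.len buttons then []
  else
    match goA buttons (buttons.length + 1) [] with
    | some order => order
    | none => []   -- KeyError propagated: outside Pre_solve

-- ===== PORT B =====

-- neigh: ring-neighbour pairs, one enumerate pass; (i±1) % n is provably in range, so the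
-- total indexing form pyGetD is exact here
def neighB (buttons : List Int) : PySem.Dict Int (Int × Int) :=
  (PySem.List.enumerate buttons 0).foldl (fun d p =>
    PySem.Dict.insert d p.2
      (PySem.List.pyGetD buttons (PySem.Int.mod (p.1 + 1) (PySem.List.len buttons)) 0,
       PySem.List.pyGetD buttons (PySem.Int.mod (p.1 - 1) (PySem.List.len buttons)) 0))
    PySem.Dict.empty

-- the cands computation of Source B's loop body; pyGet? pressed (-1) = none exactly when pressed
-- is empty; neigh[b] never misses on reachable stacks (pressed ⊆ buttons = keys);
-- sorted(adj) ported with PySem.List.sorted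
def candsB (buttons : List Int) (neigh : PySem.Dict Int (Int × Int)) (pressed : List Int) :
    List Int :=
  match PySem.List.pyGet? pressed (-1) with
  | none => buttons
  | some last =>
    let adj : PySem.Set Int := pressed.foldl (fun s b =>
      match PySem.Dict.get? neigh b with
      | some pr => PySem.Set.add (PySem.Set.add s pr.1) pr.2
      | none => s) (PySem.Set.empty : PySem.Set Int)
    (PySem.List.sorted adj (fun x => x) false).filter
      (fun c => !pressed.contains c && (PySem.Dict.getD GRAPH (PySem.Int.toStr last) []).contains c)

-- the 'for c in cands' loop body: early return on a full path, else collect children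
def innerB (n : Nat) (pressed : List Int) :
    List Int → List (List Int) → Option (List Int) × List (List Int)
  | [], children => (none, children)
  | c :: cs, children =>
    let nxt := pressed ++ [c]
    if nxt.length = n then (some nxt, children)
    else innerB n pressed cs (children ++ [nxt])

-- the while loop; stack top at the list head, so Python's stack.extend(reversed(children))
-- followed by stack.pop() is 'children ++ rest'; fuel guard (the fuel chosen in solve_alt
-- suffices on admitted inputs, proved below)
def loopB (buttons : List Int) (neigh : PySem.Dict Int (Int × Int)) :
    Nat → List (List Int) → List Int
  | _, [] => []
  | 0, _ :: _ => []
  | f + 1, pressed :: rest =>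
    match innerB buttons.length pressed (candsB buttons neigh pressed) [] with
    | (some order, _) => order
    | (none, children) => loopB buttons neigh f (children ++ rest)

def solve_alt (buttons : List Int) : List Int :=
  if PySem.Set.len (PySem.Set.ofList buttons) ≠ PySem.List.len buttons then []
  else loopB buttons (neighB buttons) ((buttons.length + 1) ^ (buttons.length + 1)) [[]]

-- ===== PRECONDITION & SPEC =====

-- Pre_solve excludes exactly the inputs on which A raises KeyError: duplicate-free lists of
-- length ≥ 2 containing an element outside 1..7 (GRAPH has only keys '1'..'7').
def Pre_solve (buttons : List Int) : Prop :=
  ¬ buttons.Nodup ∨ buttons.length ≤ 1 ∨ ∀ b ∈ buttons, 1 ≤ b ∧ b ≤ 7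

instance (buttons : List Int) : Decidable (Pre_solve buttons) := by
  unfold Pre_solve; infer_instance

def pvWitness_solve : List Int := [1, 2, 3]

def Spec_solve (buttons : List Int) (out : List Int) : Prop := out = solve_alt buttons
instance (buttons : List Int) (out : List Int) : Decidable (Spec_solve buttons out) := by
  unfold Spec_solve; infer_instance

-- ===== CLAIM (what is proved, stated in full; the proofs are below) =====
def Claim_equal_solve : Prop :=
  ∀ (buttons : List Int), Dom_solve buttons → Pre_solve buttons → Spec_solve buttons (solve buttons)

-- ===== LEMMAS AND PROOFS =====

-- proof-side abbreviations ------------------------------------------------------------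

-- the pair (buttons[(i+1)%N], buttons[(i-1)%N]) at i = buttons.index(b)
def ringNbrs (buttons : List Int) (b : Int) : Int × Int :=
  match PySem.List.index? buttons b with
  | some i => (PySem.List.pyGetD buttons (PySem.Int.mod ((i : Int) + 1) (PySem.List.len buttons)) 0,
               PySem.List.pyGetD buttons (PySem.Int.mod ((i : Int) - 1) (PySem.List.len buttons)) 0)
  | none => (0, 0)

-- the set of ring neighbours of the elements of p, as both ports build it
def adjSetA (buttons : List Int) (p : List Int) : PySem.Set Int :=
  p.foldl (fun s b => PySem.Set.add (PySem.Set.add s (ringNbrs buttons b).1) (ringNbrs buttons b).2)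
    (PySem.Set.empty : PySem.Set Int)

def isNextB (a b : Int) : Bool := (PySem.Dict.getD GRAPH (PySem.Int.toStr a) []).contains b

-- number of stack pops needed to exhaust the subtree of p (fuel-indexed)
def szF (buttons : List Int) : Nat → List Int → Nat
  | 0, _ => 1
  | f + 1, p => 1 + ((candsB buttons (neighB buttons) p).map (fun c => szF buttons f (p ++ [c]))).sum

def Wt (buttons : List Int) (stack : List (List Int)) : Nat :=
  (stack.map (fun p => szF buttons (buttons.length + 1 - p.length) p)).sum

-- small generic facts -----------------------------------------------------------------

theorem len_ne_of_not_nodup (l : List Int) (h : ¬ l.Nodup) :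
    (PySem.Set.ofList l).length ≠ l.length := by
  have hcard : (PySem.Set.ofList l).length = l.toFinset.card := by
    rw [← List.toFinset_card_of_nodup (PySem.Set.nodup_ofList (xs := l))]
    congr 1; ext x; simp [PySem.Set.mem_ofList]
  have h1 : l.dedup.Sublist l := List.dedup_sublist l
  have h2 : l.dedup ≠ l := fun he => h (he ▸ l.nodup_dedup)
  have h3 : l.dedup.length < l.length :=
    lt_of_le_of_ne h1.length_le (fun he => h2 (h1.eq_of_length he))
  rw [hcard, List.card_toFinset]; omega

theorem nodup_length_le (l m : List Int) (hn : l.Nodup) (hs : ∀ x ∈ l, x ∈ m) :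
    l.length ≤ m.length := by
  classical
  calc l.length = l.toFinset.card := (List.toFinset_card_of_nodup hn).symm
    _ ≤ m.toFinset.card := Finset.card_le_card (fun x hx => by
        simp only [List.mem_toFinset] at *; exact hs x hx)
    _ ≤ m.length := m.toFinset_card_le

theorem mem_of_full (buttons p : List Int) (hnd : buttons.Nodup) (hpn : p.Nodup)
    (hps : ∀ x ∈ p, x ∈ buttons) (hlen : p.length = buttons.length) :
    ∀ x ∈ buttons, x ∈ p := by
  classical
  have hsub : p.toFinset ⊆ buttons.toFinset := fun x hx => by
    simp only [List.mem_toFinset] at *; exact hps x hx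
  have hc : buttons.toFinset.card ≤ p.toFinset.card := by
    rw [List.toFinset_card_of_nodup hnd, List.toFinset_card_of_nodup hpn, hlen]
  have := Finset.eq_of_subset_of_card_le hsub hc
  intro x hx
  have : x ∈ p.toFinset := this ▸ List.mem_toFinset.2 hx
  exact List.mem_toFinset.1 this

theorem addIdem (s : PySem.Set Int) (x : Int) (hx : x ∈ s) :
    PySem.Set.add s x = s := by
  simp [PySem.Set.add, hx]

theorem update_pair (s : PySem.Set Int) (x y : Int) :
    PySem.Set.update s (PySem.Set.ofList [x, y]) = PySem.Set.add (PySem.Set.add s x) y := by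
  by_cases hxy : y = x
  · subst hxy
    have h1 : PySem.Set.ofList [y, y] = [y] := by
      simp [PySem.Set.ofList, PySem.Set.add, PySem.Set.empty]
    rw [h1]
    have h2 : y ∈ PySem.Set.add s y := by simp [PySem.Set.mem_add]
    rw [addIdem _ _ h2]
    rfl
  · have h1 : PySem.Set.ofList [x, y] = [x, y] := by
      simp [PySem.Set.ofList, PySem.Set.add, PySem.Set.empty, hxy]
    rw [h1]
    rfl

-- ring neighbours ----------------------------------------------------------------------

theorem ringNbrs_mem (buttons : List Int) (b : Int) (hb : b ∈ buttons) :
    (ringNbrs buttons b).1 ∈ buttons ∧ (ringNbrs buttons b).2 ∈ buttons := by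
  have hlen : 0 < buttons.length := List.length_pos_of_mem hb
  have hcast : PySem.List.len buttons = (buttons.length : Int) := PySem.List.len_eq buttons
  have hN : (0 : Int) < (buttons.length : Int) := by exact_mod_cast hlen
  cases h : PySem.List.index? buttons b with
  | none => exact absurd hb ((PySem.List.index?_eq_none_iff buttons b).1 h)
  | some i =>
    have m1 := PySem.Int.mod_nonneg ((i : Int) + 1) hN
    have m2 := PySem.Int.mod_lt ((i : Int) + 1) hN
    have m3 := PySem.Int.mod_nonneg ((i : Int) - 1) hN
    have m4 := PySem.Int.mod_lt ((i : Int) - 1) hN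
    simp only [ringNbrs, h, hcast]
    exact ⟨PySem.List.pyGetD_mem buttons 0 ⟨by omega, by omega⟩,
           PySem.List.pyGetD_mem buttons 0 ⟨by omega, by omega⟩⟩

theorem getAdjacentsA_eq (buttons : List Int) (b : Int) (hb : b ∈ buttons) :
    getAdjacentsA buttons b =
      some (PySem.Set.ofList [(ringNbrs buttons b).1, (ringNbrs buttons b).2]) := by
  have hlen : 0 < buttons.length := List.length_pos_of_mem hb
  have hcast : PySem.List.len buttons = (buttons.length : Int) := PySem.List.len_eq buttons
  have hN : (0 : Int) < (buttons.length : Int) := by exact_mod_cast hlen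
  cases h : PySem.List.index? buttons b with
  | none => exact absurd hb ((PySem.List.index?_eq_none_iff buttons b).1 h)
  | some i =>
    have m1 := PySem.Int.mod_nonneg ((i : Int) + 1) hN
    have m2 := PySem.Int.mod_lt ((i : Int) + 1) hN
    have m3 := PySem.Int.mod_nonneg ((i : Int) - 1) hN
    have m4 := PySem.Int.mod_lt ((i : Int) - 1) hN
    have h1 : PySem.List.pyGet? buttons (PySem.Int.mod ((i : Int) + 1) (buttons.length : Int)) ≠ none := by
      intro hc
      exact ((PySem.List.pyGet?_eq_none_iff _ _).1 hc) ⟨by omega, by omega⟩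
    have h2 : PySem.List.pyGet? buttons (PySem.Int.mod ((i : Int) - 1) (buttons.length : Int)) ≠ none := by
      intro hc
      exact ((PySem.List.pyGet?_eq_none_iff _ _).1 hc) ⟨by omega, by omega⟩
    obtain ⟨x, hx⟩ := Option.ne_none_iff_exists'.1 h1
    obtain ⟨y, hy⟩ := Option.ne_none_iff_exists'.1 h2
    simp only [getAdjacentsA, h, hx, hy, ringNbrs, PySem.List.pyGetD, hcast, Option.getD_some]

theorem neighB_get? (buttons : List Int) (hnd : buttons.Nodup) (b : Int) (hb : b ∈ buttons) :
    PySem.Dict.get? (neighB buttons) b = some (ringNbrs buttons b) := by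
  cases h : PySem.List.index? buttons b with
  | none => exact absurd hb ((PySem.List.index?_eq_none_iff buttons b).1 h)
  | some i =>
    obtain ⟨hk, hgb, -⟩ := PySem.List.getElem_of_index?_eq_some h
    have hitems : (neighB buttons).items =
        (PySem.List.enumerate buttons 0).map (fun a => (a.2,
          (PySem.List.pyGetD buttons (PySem.Int.mod (a.1 + 1) (PySem.List.len buttons)) 0,
           PySem.List.pyGetD buttons (PySem.Int.mod (a.1 - 1) (PySem.List.len buttons)) 0))) := by
      unfold neighB
      rw [PySem.Dict.items_foldl_insert_fresh (PySem.List.enumerate buttons 0) (fun p => p.2) _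
        PySem.Dict.empty (fun a _ => PySem.Dict.contains_empty _) (by
          rw [PySem.List.map_snd_enumerate]; exact hnd)]
      rfl
    have hmem : (b, ringNbrs buttons b) ∈ (neighB buttons).items := by
      rw [hitems]
      refine List.mem_map.2 ⟨((i : Int), b), ?_, ?_⟩
      · rw [PySem.List.mem_enumerate_iff]
        exact ⟨i, hk, by simp [hgb]⟩
      · simp only [ringNbrs, h]
    have hkeys : (neighB buttons).keys.Nodup := by
      unfold neighB
      exact PySem.Dict.nodup_keys_foldl_insert_key _ _ _ _ PySem.Dict.nodup_keys_empty
    exact PySem.Dict.get?_of_mem_items _ hmem hkeys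

-- the two set computations agree -------------------------------------------------------

theorem availAdjA_eq (buttons p : List Int) (hp : ∀ x ∈ p, x ∈ buttons) :
    availAdjA buttons p =
      some ((PySem.List.sorted (adjSetA buttons p) (fun x => x) false).filter
        (fun a => !p.contains a)) := by
  have key : ∀ (q : List Int) (s : PySem.Set Int), (∀ b ∈ q, b ∈ buttons) →
      q.foldl (fun acc button =>
        match acc, getAdjacentsA buttons button with
        | some s, some t => some (PySem.Set.update s t)
        | _, _ => none) (some s) =
      some (q.foldl (fun s b =>
        PySem.Set.add (PySem.Set.add s (ringNbrs buttons b).1) (ringNbrs buttons b).2) s) := by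
    intro q
    induction q with
    | nil => intro s _; rfl
    | cons b q ih =>
      intro s hq
      simp only [List.foldl_cons, getAdjacentsA_eq buttons b (hq b (List.mem_cons_self))]
      rw [update_pair]
      exact ih _ (fun x hx => hq x (List.mem_cons_of_mem _ hx))
  simp only [availAdjA, key p PySem.Set.empty hp]
  rfl

theorem candsB_eq (buttons p : List Int) (hnd : buttons.Nodup) (hne : p ≠ [])
    (hp : ∀ x ∈ p, x ∈ buttons) :
    candsB buttons (neighB buttons) p =
      (PySem.List.sorted (adjSetA buttons p) (fun x => x) false).filter
        (fun c => !p.contains c && isNextB (p.getLast hne) c) := by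
  have hlast : PySem.List.pyGet? p (-1) = some (p.getLast hne) := by
    rw [PySem.List.pyGet?_neg_one, List.getLast?_eq_some_getLast]
  have hfold : p.foldl (fun s b =>
      match PySem.Dict.get? (neighB buttons) b with
      | some pr => PySem.Set.add (PySem.Set.add s pr.1) pr.2
      | none => s) (PySem.Set.empty : PySem.Set Int) = adjSetA buttons p := by
    unfold adjSetA
    exact PySem.List.foldl_congr_mem p _ _ _ (fun acc x hx => by
      rw [neighB_get? buttons hnd x (hp x hx)])
  simp only [candsB, hlast, hfold, isNextB]

theorem adjSetA_nodup (buttons p : List Int) : (adjSetA buttons p).Nodup := by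
  have key : ∀ (q : List Int) (s : PySem.Set Int), s.Nodup →
      (q.foldl (fun s b =>
        PySem.Set.add (PySem.Set.add s (ringNbrs buttons b).1) (ringNbrs buttons b).2) s).Nodup := by
    intro q
    induction q with
    | nil => intro s hs; exact hs
    | cons b q ih =>
      intro s hs
      simp only [List.foldl_cons]
      exact ih _ (PySem.Set.nodup_add _ _ (PySem.Set.nodup_add _ _ hs))
  exact key p _ List.nodup_nil

theorem adjSetA_sub (buttons p : List Int) (hp : ∀ x ∈ p, x ∈ buttons) :
    ∀ x ∈ adjSetA buttons p, x ∈ buttons := by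
  have key : ∀ (q : List Int) (s : PySem.Set Int), (∀ b ∈ q, b ∈ buttons) →
      (∀ x ∈ s, x ∈ buttons) →
      ∀ x ∈ q.foldl (fun s b =>
        PySem.Set.add (PySem.Set.add s (ringNbrs buttons b).1) (ringNbrs buttons b).2) s,
        x ∈ buttons := by
    intro q
    induction q with
    | nil => intro s _ hs x hx; exact hs x hx
    | cons b q ih =>
      intro s hq hs x hx
      simp only [List.foldl_cons] at hx
      refine ih _ (fun y hy => hq y (List.mem_cons_of_mem _ hy)) ?_ x hx
      intro y hy
      rcases (PySem.Set.mem_add _ _ _).1 hy with hy | rfl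
      · rcases (PySem.Set.mem_add _ _ _).1 hy with hy | rfl
        · exact hs y hy
        · exact (ringNbrs_mem buttons b (hq b List.mem_cons_self)).1
      · exact (ringNbrs_mem buttons b (hq b List.mem_cons_self)).2
  exact key p _ hp (fun x hx => absurd hx (List.not_mem_nil))

-- candidate lists ----------------------------------------------------------------------

theorem candsB_nil (buttons : List Int) (neigh : PySem.Dict Int (Int × Int)) :
    candsB buttons neigh [] = buttons := rfl

theorem candsB_props (buttons p : List Int) (hnd : buttons.Nodup)
    (hp : ∀ x ∈ p, x ∈ buttons) :
    ∀ c ∈ candsB buttons (neighB buttons) p, c ∈ buttons ∧ c ∉ p := by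
  by_cases hne : p = []
  · subst hne
    rw [candsB_nil]
    exact fun c hc => ⟨hc, List.not_mem_nil⟩
  · rw [candsB_eq buttons p hnd hne hp]
    intro c hc
    rw [List.mem_filter] at hc
    obtain ⟨hc1, hc2⟩ := hc
    rw [Bool.and_eq_true, Bool.not_eq_eq_eq_not, Bool.not_true, ← Bool.not_eq_true] at hc2
    refine ⟨adjSetA_sub buttons p hp c ((PySem.List.mem_sorted _ _ _ _).1 hc1), ?_⟩
    intro hcp
    exact hc2.1 (List.contains_iff_mem.2 hcp)

theorem candsB_len (buttons p : List Int) (hnd : buttons.Nodup)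
    (hp : ∀ x ∈ p, x ∈ buttons) :
    (candsB buttons (neighB buttons) p).length ≤ buttons.length := by
  by_cases hne : p = []
  · subst hne; rw [candsB_nil]
  · rw [candsB_eq buttons p hnd hne hp]
    have hnd2 : ((PySem.List.sorted (adjSetA buttons p) (fun x => x) false).filter
        (fun c => !p.contains c && isNextB (p.getLast hne) c)).Nodup :=
      ((PySem.List.sorted_perm _ _ _).nodup_iff.2 (adjSetA_nodup buttons p)).filter _
    refine nodup_length_le _ _ hnd2 ?_
    intro x hx
    rw [List.mem_filter] at hx
    exact adjSetA_sub buttons p hp x ((PySem.List.mem_sorted _ _ _ _).1 hx.1)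

theorem candsB_full (buttons p : List Int) (hnd : buttons.Nodup) (hpn : p.Nodup)
    (hp : ∀ x ∈ p, x ∈ buttons) (hlen : p.length = buttons.length) :
    candsB buttons (neighB buttons) p = [] := by
  by_cases hne : p = []
  · subst hne
    rw [candsB_nil]
    simp only [List.length_nil] at hlen
    exact List.length_eq_zero_iff.1 hlen.symm
  · rw [candsB_eq buttons p hnd hne hp]
    rw [List.filter_eq_nil_iff]
    intro c hc
    have hcb : c ∈ buttons := adjSetA_sub buttons p hp c ((PySem.List.mem_sorted _ _ _ _).1 hc)
    have hcp : c ∈ p := mem_of_full buttons p hnd hpn hp hlen c hcb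
    simp
    intro h
    exact absurd hcp h

-- is_next ------------------------------------------------------------------------------

theorem isNextA_eq (a b : Int) (h1 : 1 ≤ a) (h7 : a ≤ 7) :
    isNextA a b = some (isNextB a b) := by
  interval_cases a <;> rfl

-- A's candidate loop -------------------------------------------------------------------

theorem goALoop_skip (buttons p : List Int) (gn : List Int → Option (List Int))
    (c : Int) (cs : List Int) (last : Int) (hp : p.isEmpty = false)
    (hg : PySem.List.pyGet? p (-1) = some last) (hn : isNextA last c = some false) :
    goALoop buttons gn p (c :: cs) = goALoop buttons gn p cs := by
  simp [goALoop, hp, hg, hn]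

theorem goALoop_try (buttons p : List Int) (gn : List Int → Option (List Int))
    (c : Int) (cs : List Int) (last : Int) (hp : p.isEmpty = false)
    (hg : PySem.List.pyGet? p (-1) = some last) (hn : isNextA last c = some true) :
    goALoop buttons gn p (c :: cs) =
      match gn (p ++ [c]) with
      | none => none
      | some order =>
        if order.length = buttons.length then some order else goALoop buttons gn p cs := by
  simp [goALoop, hp, hg, hn]

theorem goALoop_try_nil (buttons : List Int) (gn : List Int → Option (List Int))
    (c : Int) (cs : List Int) :
    goALoop buttons gn [] (c :: cs) =
      match gn [c] with
      | none => none
      | some order =>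
        if order.length = buttons.length then some order else goALoop buttons gn [] cs := by
  simp [goALoop]

theorem goALoop_filter (buttons p : List Int) (gn : List Int → Option (List Int))
    (last : Int) (hp : p.isEmpty = false) (hg : PySem.List.pyGet? p (-1) = some last)
    (av : List Int) (hav : ∀ c ∈ av, isNextA last c = some (isNextB last c)) :
    goALoop buttons gn p av = goALoop buttons gn p (av.filter (fun c => isNextB last c)) := by
  induction av with
  | nil => rfl
  | cons c cs ih =>
    have hnc := hav c List.mem_cons_self
    have ihcs := ih (fun x hx => hav x (List.mem_cons_of_mem _ hx))
    cases h : isNextB last c with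
    | false =>
      rw [List.filter_cons_of_neg (by simp [h])]
      rw [goALoop_skip buttons p gn c cs last hp hg (by rw [hnc, h]), ihcs]
    | true =>
      rw [List.filter_cons_of_pos (by simp [h])]
      rw [goALoop_try buttons p gn c cs last hp hg (by rw [hnc, h]),
          goALoop_try buttons p gn c _ last hp hg (by rw [hnc, h])]
      cases hgn : gn (p ++ [c]) with
      | none => rfl
      | some r =>
        simp only []
        split
        · rfl
        · exact ihcs

-- A's recursion unfolds over exactly B's candidate list ---------------------------------

theorem goA_eff (buttons p : List Int) (hnd : buttons.Nodup)
    (hrg : ∀ b ∈ buttons, 1 ≤ b ∧ b ≤ 7) (hp : ∀ x ∈ p, x ∈ buttons) (f : Nat) :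
    goA buttons (f + 1) p =
      goALoop buttons (fun q => goA buttons f q) p (candsB buttons (neighB buttons) p) := by
  by_cases hne : p = []
  · subst hne
    rw [candsB_nil]
    simp only [goA, availAdjA_eq buttons [] (fun x hx => absurd hx List.not_mem_nil)]
    rfl
  · have hpe : p.isEmpty = false := by simp [hne]
    have hlastm : p.getLast hne ∈ buttons := hp _ (List.getLast_mem hne)
    have hlast : PySem.List.pyGet? p (-1) = some (p.getLast hne) := by
      rw [PySem.List.pyGet?_neg_one, List.getLast?_eq_some_getLast]
    simp only [goA, availAdjA_eq buttons p hp, hpe, Bool.false_eq_true, if_false]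
    rw [goALoop_filter buttons p _ (p.getLast hne) hpe hlast _ (fun c _ =>
      isNextA_eq _ c (hrg _ hlastm).1 (hrg _ hlastm).2)]
    rw [candsB_eq buttons p hnd hne hp, List.filter_filter]
    exact congrArg _ (List.filter_congr (fun a _ => Bool.and_comm _ _))

-- B's inner loop -----------------------------------------------------------------------

theorem innerB_full (n : Nat) (p : List Int) (c : Int) (cs : List Int)
    (acc : List (List Int)) (h : p.length + 1 = n) :
    innerB n p (c :: cs) acc = (some (p ++ [c]), acc) := by
  simp [innerB, h]

theorem innerB_notfull (n : Nat) (p : List Int) (cs : List Int) (acc : List (List Int))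
    (h : p.length + 1 ≠ n) :
    innerB n p cs acc = (none, acc ++ cs.map (fun c => p ++ [c])) := by
  induction cs generalizing acc with
  | nil => simp [innerB]
  | cons c cs ih => simp [innerB, h, ih]

theorem loopB_nil (buttons : List Int) (neigh : PySem.Dict Int (Int × Int)) (f : Nat) :
    loopB buttons neigh f [] = [] := by
  cases f <;> rfl

-- size bookkeeping ----------------------------------------------------------------------

theorem szF_pos (buttons : List Int) (f : Nat) (p : List Int) : 1 ≤ szF buttons f p := by
  cases f <;> simp [szF]

theorem szF_le_pow (buttons : List Int) (hnd : buttons.Nodup) :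
    ∀ (f : Nat) (p : List Int), (∀ x ∈ p, x ∈ buttons) →
      szF buttons f p ≤ (buttons.length + 1) ^ f := by
  intro f
  induction f with
  | zero => intro p _; simp [szF]
  | succ f ih =>
    intro p hp
    have hlen := candsB_len buttons p hnd hp
    have hB : 1 ≤ (buttons.length + 1) ^ f := Nat.one_le_pow _ _ (by omega)
    have h1 : ((candsB buttons (neighB buttons) p).map
        (fun c => szF buttons f (p ++ [c]))).sum ≤
        (candsB buttons (neighB buttons) p).length * (buttons.length + 1) ^ f := by
      have := List.sum_le_card_nsmul ((candsB buttons (neighB buttons) p).map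
        (fun c => szF buttons f (p ++ [c]))) ((buttons.length + 1) ^ f) (by
          intro x hx
          obtain ⟨c, hc, rfl⟩ := List.mem_map.1 hx
          refine ih (p ++ [c]) ?_
          intro y hy
          rcases List.mem_append.1 hy with hy | hy
          · exact hp y hy
          · rw [List.mem_singleton] at hy
            exact hy ▸ (candsB_props buttons p hnd hp c hc).1)
      simpa using this
    have h2 : (candsB buttons (neighB buttons) p).length * (buttons.length + 1) ^ f ≤
        buttons.length * (buttons.length + 1) ^ f := Nat.mul_le_mul_right _ hlen
    have h3 : (buttons.length + 1) ^ (f + 1) =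
        buttons.length * (buttons.length + 1) ^ f + (buttons.length + 1) ^ f := by ring
    simp only [szF]
    omega

-- the simulation ------------------------------------------------------------------------

theorem sim (buttons : List Int) (hnd : buttons.Nodup)
    (hrg : ∀ b ∈ buttons, 1 ≤ b ∧ b ≤ 7) :
    ∀ (K : Nat) (p : List Int) (rest : List (List Int)) (g : Nat),
      szF buttons (buttons.length + 1 - p.length) p ≤ K →
      p.Nodup → (∀ x ∈ p, x ∈ buttons) → p.length < buttons.length →
      Wt buttons (p :: rest) ≤ g →
      ∃ r, goA buttons (buttons.length + 1 - p.length) p = some r ∧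
        ((r.length = buttons.length ∧ loopB buttons (neighB buttons) g (p :: rest) = r) ∨
         (r = p ∧ loopB buttons (neighB buttons) g (p :: rest) =
            loopB buttons (neighB buttons)
              (g - szF buttons (buttons.length + 1 - p.length) p) rest)) := by
  intro K
  induction K using Nat.strong_induction_on with
  | _ K IH =>
  intro p rest g hK hpn hps hplt hg
  have hm : buttons.length + 1 - p.length = (buttons.length - p.length) + 1 := by omega
  rw [hm] at hK
  set n := buttons.length with hn
  set nb := neighB buttons with hnb
  set m := n - p.length with hmdef
  have hAeff := goA_eff buttons p hnd hrg hps m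
  set cands := candsB buttons nb p with hcands
  have hcprops := candsB_props buttons p hnd hps
  have hsz : szF buttons (m + 1) p =
      1 + (cands.map (fun c => szF buttons m (p ++ [c]))).sum := by
    simp [szF, hcands, hnb]
  have hWt : Wt buttons (p :: rest) =
      szF buttons (m + 1) p + Wt buttons rest := by
    unfold Wt
    rw [List.map_cons, List.sum_cons, hm]
  have hg1 : 1 ≤ g := by
    have := szF_pos buttons (m + 1) p
    omega
  obtain ⟨g', rfl⟩ : ∃ g', g = g' + 1 := ⟨g - 1, by omega⟩
  have hqfacts : ∀ c ∈ cands, (p ++ [c]).Nodup ∧ (∀ x ∈ p ++ [c], x ∈ buttons) ∧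
      (p ++ [c]).length = p.length + 1 ∧ n + 1 - (p ++ [c]).length = m := by
    intro c hc
    obtain ⟨hcb, hcp⟩ := hcprops c (hcands ▸ hc)
    refine ⟨?_, ?_, ?_, ?_⟩
    · simp only [List.nodup_append, List.nodup_singleton, true_and]
      refine ⟨hpn, ?_⟩
      intro a ha b hb
      rw [List.mem_singleton] at hb
      subst hb
      intro hab
      exact hcp (hab ▸ ha)
    · intro x hx
      rcases List.mem_append.1 hx with hx | hx
      · exact hps x hx
      · rw [List.mem_singleton] at hx; exact hx ▸ hcb
    · simp
    · simp; omega
  have htryc : ∀ (c : Int) (cs : List Int), c ∈ candsB buttons nb p →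
      goALoop buttons (fun q => goA buttons m q) p (c :: cs) =
        match goA buttons m (p ++ [c]) with
        | none => none
        | some order => if order.length = n then some order
                        else goALoop buttons (fun q => goA buttons m q) p cs := by
    intro c cs hc
    by_cases hne : p = []
    · subst hne
      exact goALoop_try_nil buttons _ c cs
    · have hpe : p.isEmpty = false := by simp [hne]
      have hlast : PySem.List.pyGet? p (-1) = some (p.getLast hne) := by
        rw [PySem.List.pyGet?_neg_one, List.getLast?_eq_some_getLast]
      have hlastm : p.getLast hne ∈ buttons := hps _ (List.getLast_mem hne)
      have hnx : isNextB (p.getLast hne) c = true := by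
        rw [candsB_eq buttons p hnd hne hps] at hc
        rw [List.mem_filter] at hc
        have h2 := hc.2
        rw [Bool.and_eq_true] at h2
        exact h2.2
      exact goALoop_try buttons p _ c cs (p.getLast hne) hpe hlast
        (by rw [isNextA_eq _ c (hrg _ hlastm).1 (hrg _ hlastm).2, hnx])
  by_cases hfull : p.length + 1 = n
  · -- children would be complete paths: B early-returns, A's first child succeeds at once
    cases hcc : cands with
    | nil =>
      refine ⟨p, ?_, Or.inr ⟨rfl, ?_⟩⟩
      · rw [hm, hAeff, hcc]
        rfl
      · have hB : loopB buttons nb (g' + 1) (p :: rest) =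
            loopB buttons nb g' rest := by
          show (match innerB buttons.length p cands [] with
            | (some order, _) => order
            | (none, children) => loopB buttons nb g' (children ++ rest)) = _
          rw [hcc]
          simp [innerB]
        rw [hB, hm, hsz, hcc]
        simp
    | cons c cs =>
      have hcmem : c ∈ cands := hcc ▸ List.mem_cons_self
      obtain ⟨hqn, hqs, hqlen, hqm⟩ := hqfacts c hcmem
      have hm1 : m = 1 := by omega
      have hfullq : (p ++ [c]).length = n := by omega
      have hgoq : goA buttons m (p ++ [c]) = some (p ++ [c]) := by
        rw [hm1]
        rw [goA_eff buttons (p ++ [c]) hnd hrg hqs 0]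
        rw [candsB_full buttons (p ++ [c]) hnd hqn hqs hfullq]
        rfl
      refine ⟨p ++ [c], ?_, Or.inl ⟨hfullq, ?_⟩⟩
      · rw [hm, hAeff, hcc, htryc c cs (hcands ▸ hcmem), hgoq]
        simp [hfullq]
      · show (match innerB buttons.length p cands [] with
          | (some order, _) => order
          | (none, children) => loopB buttons nb g' (children ++ rest)) = _
        rw [hcc, innerB_full _ _ _ _ _ hfull]
  · -- no child is complete: B pushes all children; walk the candidate list
    have hWmap : ∀ cs' : List Int, (∀ c ∈ cs', c ∈ cands) →
        Wt buttons (cs'.map (fun c => p ++ [c]) ++ rest) =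
          (cs'.map (fun c => szF buttons m (p ++ [c]))).sum + Wt buttons rest := by
      intro cs' hcs'
      unfold Wt
      rw [List.map_append, List.map_map, List.sum_append]
      congr 1
      apply congrArg
      apply List.map_congr_left
      intro c hc
      simp only [Function.comp_apply]
      rw [(hqfacts c (hcs' c hc)).2.2.2]
    have chain : ∀ (cs : List Int), (∀ c ∈ cs, c ∈ cands) → ∀ (g₂ : Nat),
        (cs.map (fun c => szF buttons m (p ++ [c]))).sum + Wt buttons rest ≤ g₂ →
        ∃ r, goALoop buttons (fun q => goA buttons m q) p cs = some r ∧
          ((r.length = n ∧ loopB buttons nb g₂ (cs.map (fun c => p ++ [c]) ++ rest) = r) ∨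
           (r = p ∧ loopB buttons nb g₂ (cs.map (fun c => p ++ [c]) ++ rest) =
              loopB buttons nb (g₂ - (cs.map (fun c => szF buttons m (p ++ [c]))).sum) rest)) := by
      intro cs
      induction cs with
      | nil =>
        intro _ g₂ _
        exact ⟨p, rfl, Or.inr ⟨rfl, by simp⟩⟩
      | cons c cs ihc =>
        intro hcs g₂ hg₂
        have hcmem : c ∈ cands := hcs c List.mem_cons_self
        obtain ⟨hqn, hqs, hqlen, hqm⟩ := hqfacts c hcmem
        have hqlt : (p ++ [c]).length < n := by omega
        have hszlt : szF buttons m (p ++ [c]) < K := by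
          have hmem : szF buttons m (p ++ [c]) ∈
              cands.map (fun c => szF buttons m (p ++ [c])) :=
            List.mem_map.2 ⟨c, hcmem, rfl⟩
          have := List.single_le_sum (fun (x : Nat) _ => Nat.zero_le x) _ hmem
          omega
        have hWcons : Wt buttons ((p ++ [c]) :: (cs.map (fun c => p ++ [c]) ++ rest)) =
            szF buttons m (p ++ [c]) +
              ((cs.map (fun c => szF buttons m (p ++ [c]))).sum + Wt buttons rest) := by
          unfold Wt
          rw [List.map_cons, List.sum_cons]
          have := hWmap cs (fun x hx => hcs x (List.mem_cons_of_mem _ hx))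
          unfold Wt at this
          rw [this, hqm]
        simp only [List.map_cons, List.sum_cons] at hg₂
        obtain ⟨r₁, hr₁, hd₁⟩ := IH (szF buttons m (p ++ [c])) hszlt (p ++ [c])
          (cs.map (fun c => p ++ [c]) ++ rest) g₂ (by rw [hqm]) hqn hqs hqlt
          (by rw [hWcons]; omega)
        rw [hqm] at hr₁ hd₁
        have hAstep := htryc c cs (hcands ▸ hcmem)
        rcases hd₁ with ⟨hlen₁, hB₁⟩ | ⟨hre₁, hB₁⟩
        · refine ⟨r₁, ?_, Or.inl ⟨hlen₁, ?_⟩⟩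
          · rw [hAstep, hr₁]
            simp [hlen₁]
          · rw [List.map_cons, List.cons_append]
            exact hB₁
        · have hlenne : r₁.length ≠ n := by rw [hre₁]; omega
          obtain ⟨r₂, hA₂, hd₂⟩ := ihc (fun x hx => hcs x (List.mem_cons_of_mem _ hx))
            (g₂ - szF buttons m (p ++ [c])) (by omega)
          refine ⟨r₂, ?_, ?_⟩
          · rw [hAstep, hr₁]
            simp only []
            rw [if_neg hlenne]
            exact hA₂
          · have hBfront : loopB buttons nb g₂
                ((c :: cs).map (fun c => p ++ [c]) ++ rest) =
                loopB buttons nb (g₂ - szF buttons m (p ++ [c]))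
                  (cs.map (fun c => p ++ [c]) ++ rest) := by
              rw [List.map_cons, List.cons_append]
              exact hB₁
            rcases hd₂ with ⟨hlen₂, hB₂⟩ | ⟨hre₂, hB₂⟩
            · exact Or.inl ⟨hlen₂, by rw [hBfront]; exact hB₂⟩
            · refine Or.inr ⟨hre₂, ?_⟩
              rw [hBfront, hB₂]
              simp only [List.map_cons, List.sum_cons]
              congr 1
              omega
    obtain ⟨r, hA, hd⟩ := chain cands (fun c hc => hc) g' (by
      rw [hWt, hsz] at hg
      omega)
    have hBun : loopB buttons nb (g' + 1) (p :: rest) =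
        loopB buttons nb g' (cands.map (fun c => p ++ [c]) ++ rest) := by
      show (match innerB buttons.length p cands [] with
        | (some order, _) => order
        | (none, children) => loopB buttons nb g' (children ++ rest)) = _
      rw [innerB_notfull _ _ _ _ hfull]
      simp
    refine ⟨r, ?_, ?_⟩
    · rw [hm, hAeff]
      exact hA
    · rcases hd with ⟨hlen, hB⟩ | ⟨hre, hB⟩
      · exact Or.inl ⟨hlen, by rw [hBun]; exact hB⟩
      · refine Or.inr ⟨hre, ?_⟩
        rw [hBun, hB, hm, hsz]
        congr 1
        omega


theorem main_eq (buttons : List Int) (hnd : buttons.Nodup)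
    (hrg : ∀ b ∈ buttons, 1 ≤ b ∧ b ≤ 7) : solve buttons = solve_alt buttons := by
  by_cases hnil : buttons = []
  · subst hnil; decide
  · have hpos : 0 < buttons.length := List.length_pos_of_ne_nil hnil
    have hofl : PySem.Set.ofList buttons = buttons := PySem.Set.ofList_eq_self_of_nodup buttons hnd
    have heq : PySem.Set.len (PySem.Set.ofList buttons) = PySem.List.len buttons := by
      rw [hofl, PySem.Set.len, PySem.List.len_eq]
    have hWt0 : Wt buttons [[]] =
        szF buttons (buttons.length + 1 - ([] : List Int).length) [] := by
      simp [Wt]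
    obtain ⟨r, hA, hd⟩ := sim buttons hnd hrg
      (szF buttons (buttons.length + 1 - ([] : List Int).length) []) [] []
      ((buttons.length + 1) ^ (buttons.length + 1)) (le_refl _) List.nodup_nil
      (fun x hx => absurd hx List.not_mem_nil) (by simpa using hpos)
      (by
        rw [hWt0]
        simpa using szF_le_pow buttons hnd (buttons.length + 1) []
          (fun x hx => absurd hx List.not_mem_nil))
    have hfuel : buttons.length + 1 - ([] : List Int).length = buttons.length + 1 := by simp
    rw [hfuel] at hA hd
    unfold solve solve_alt
    rw [if_neg (not_not_intro heq), if_neg (not_not_intro heq), hA]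
    rcases hd with ⟨_, hB⟩ | ⟨hre, hB⟩
    · exact hB.symm
    · rw [hB, loopB_nil, hre]

theorem single_eq (b : Int) : solve [b] = solve_alt [b] := by
  simp [solve, solve_alt, goA, goALoop, availAdjA, getAdjacentsA, candsB, neighB, innerB,
    loopB, PySem.Set.ofList, PySem.Set.add, PySem.Set.empty, PySem.Set.len,
    PySem.List.len, PySem.List.index?, PySem.List.pyGet?, PySem.List.pyGetD,
    PySem.Int.mod, PySem.List.sorted, PySem.List.enumerate, PySem.Dict.insert,
    PySem.Dict.empty, PySem.List.pyIdx?, PySem.List.insertBy]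

-- ===== VERDICT (by name: the statement is the Claim_ definition above) =====
theorem solve_spec : Claim_equal_solve := by
  intro buttons _ hpre
  unfold Spec_solve
  by_cases hnd : buttons.Nodup
  · rcases hpre with h | h | h
    · exact absurd hnd h
    · rcases buttons with _ | ⟨b, _ | ⟨c, t⟩⟩
      · decide
      · exact single_eq b
      · simp at h
    · exact main_eq buttons hnd h
  · have hne := len_ne_of_not_nodup buttons hnd
    have hne2 : PySem.Set.len (PySem.Set.ofList buttons) ≠ PySem.List.len buttons := by
      rw [PySem.Set.len, PySem.List.len_eq]
      exact_mod_cast hne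
    unfold solve solve_alt
    rw [if_pos hne2, if_pos hne2]
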